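-- pv_equiv track=rewrite | github.com/jqpoon/google-kickstart2021 | rounda/problem2.py | get_segments_col
-- ===== SOURCE A (Python) =====
-- def get_segments_col(col, r, idx):
--     segments = set()
--     start = -1
--     end = -1
--     for i in range(r):
--         # skip 0s
--         if not col[i]:
--             if (start != -1 and end != -1 and start != end):
--                 segments.add(((start, idx), (end, idx), end - start + 1))
--             start = -1
--             end = -1
--             continue
--
--         # start of segment
--         if (start == -1):
--             start = i
--             end = i
--             continue
--
--         end += 1
--
--     if (start != -1 and end != -1 and start != end):
--         segments.add(((start, idx), (end, idx), end - start + 1))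
--
--     return segments
-- ===== SOURCE B (Python) =====
-- def get_segments_col(col, r, idx):
--     # Skip to each nonzero run with a nested scan: find its end in one inner
--     # loop, record it if it spans at least two cells, jump past it.
--     segments = set()
--     i = 0
--     while i < r:
--         if col[i]:
--             j = i
--             while j < r and col[j]:
--                 j += 1
--             if j - i >= 2:
--                 segments.add(((i, idx), (j - 1, idx), j - i))
--             i = j
--         else:
--             i += 1
--     return segments
-- ===== Notes on version B (the rewrite author's own statement) =====
-- stated objective: alternative
-- what changed: Replaces A's per-index state machine (start/end sentinels with flush logic repeated in-loop and after the loop) by a run-jumping two-level scan: an inner while finds the end of each nonzero run in one go, the segment is emitted once, and the outer index jumps past the run.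
import Mathlib
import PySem

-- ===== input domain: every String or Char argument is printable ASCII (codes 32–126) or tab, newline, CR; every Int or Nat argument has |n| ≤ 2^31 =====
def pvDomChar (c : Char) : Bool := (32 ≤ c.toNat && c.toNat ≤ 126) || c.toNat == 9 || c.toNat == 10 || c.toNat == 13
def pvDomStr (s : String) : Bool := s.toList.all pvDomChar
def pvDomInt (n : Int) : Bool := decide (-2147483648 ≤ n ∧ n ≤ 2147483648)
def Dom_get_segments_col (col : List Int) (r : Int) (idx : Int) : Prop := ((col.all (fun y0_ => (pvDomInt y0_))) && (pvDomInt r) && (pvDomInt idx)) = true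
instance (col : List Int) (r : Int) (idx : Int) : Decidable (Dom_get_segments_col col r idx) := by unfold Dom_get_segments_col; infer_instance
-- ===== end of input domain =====

-- B replaces A's start/end sentinel state machine by a run-jumping two-level scan; objective: alternative decomposition.


-- ===== PORT A =====
-- the flush that A performs both inside the loop (on a zero cell) and after the loop
def flushA (idx : Int) (segments : List ((Int × Int) × (Int × Int) × Int)) (start e : Int) :
    List ((Int × Int) × (Int × Int) × Int) :=
  if start ≠ -1 ∧ e ≠ -1 ∧ start ≠ e then
    PySem.Set.add segments ((start, idx), (e, idx), e - start + 1)
  else segments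

-- one iteration of A's for-loop body; state = (segments, start, end)
def stepA (col : List Int) (idx : Int)
    (s : (List ((Int × Int) × (Int × Int) × Int)) × Int × Int) (i : Int) :
    (List ((Int × Int) × (Int × Int) × Int)) × Int × Int :=
  if PySem.List.pyGetD col i 0 = 0 then
    (flushA idx s.1 s.2.1 s.2.2, -1, -1)
  else if s.2.1 = -1 then (s.1, i, i)
  else (s.1, s.2.1, s.2.2 + 1)

def get_segments_col (col : List Int) (r : Int) (idx : Int) : List ((Int × Int) × (Int × Int) × Int) :=
  let st := (PySem.List.pyRange 0 r 1).foldl (stepA col idx) ([], -1, -1)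
  flushA idx st.1 st.2.1 st.2.2

-- ===== PORT B =====
-- inner while loop ('while j < r and col[j]: j += 1'), made total by a fuel counter
def scanRunGo (col : List Int) (r : Int) : Nat → Int → Int
  | 0, j => j
  | Nat.succ fuel, j =>
    if j < r ∧ PySem.List.pyGetD col j 0 ≠ 0 then scanRunGo col r fuel (j + 1) else j

def scanRun (col : List Int) (r j : Int) : Int := scanRunGo col r (r - j).toNat j

-- outer while loop of B, made total by a fuel counter
def altLoopGo (col : List Int) (r idx : Int) :
    Nat → Int → List ((Int × Int) × (Int × Int) × Int) → List ((Int × Int) × (Int × Int) × Int)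
  | 0, _, segments => segments
  | Nat.succ fuel, i, segments =>
    if i < r then
      if PySem.List.pyGetD col i 0 ≠ 0 then
        altLoopGo col r idx fuel (scanRun col r i)
          (if 2 ≤ scanRun col r i - i then
            PySem.Set.add segments ((i, idx), (scanRun col r i - 1, idx), scanRun col r i - i)
          else segments)
      else altLoopGo col r idx fuel (i + 1) segments
    else segments

def altLoop (col : List Int) (r idx : Int) (i : Int)
    (segments : List ((Int × Int) × (Int × Int) × Int)) : List ((Int × Int) × (Int × Int) × Int) :=
  altLoopGo col r idx (r - i).toNat i segments

def get_segments_col_alt (col : List Int) (r : Int) (idx : Int) : List ((Int × Int) × (Int × Int) × Int) :=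
  altLoop col r idx 0 []

-- ===== PRECONDITION & SPEC =====
-- Pre_ excludes r > len(col), on which Python A (and B) raise IndexError.
def Pre_get_segments_col (col : List Int) (r : Int) (idx : Int) : Prop := r ≤ (col.length : Int)
instance (col : List Int) (r : Int) (idx : Int) : Decidable (Pre_get_segments_col col r idx) := by
  unfold Pre_get_segments_col; infer_instance

def pvWitness_get_segments_col : List Int × Int × Int := ([1, 1, 0, 5, 5, 5], 6, 2)

def Spec_get_segments_col (col : List Int) (r : Int) (idx : Int) (out : List ((Int × Int) × (Int × Int) × Int)) : Prop := out = get_segments_col_alt col r idx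
instance (col : List Int) (r : Int) (idx : Int) (out : List ((Int × Int) × (Int × Int) × Int)) : Decidable (Spec_get_segments_col col r idx out) := by unfold Spec_get_segments_col; infer_instance

-- ===== CLAIM (what is proved, stated in full; the proofs are below) =====
def Claim_equal_get_segments_col : Prop := ∀ (col : List Int) (r : Int) (idx : Int), Dom_get_segments_col col r idx → Pre_get_segments_col col r idx → Spec_get_segments_col col r idx (get_segments_col col r idx)

-- ===== LEMMAS AND PROOFS =====

-- enough fuel: scanRunGo is fuel-independent once the fuel covers the remaining distance
theorem scanRunGo_fuel (col : List Int) (r : Int) :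
    ∀ (n m : Nat) (j : Int), (r - j).toNat ≤ n → (r - j).toNat ≤ m →
      scanRunGo col r n j = scanRunGo col r m j := by
  intro n
  induction n with
  | zero =>
    intro m j hn hm
    have hc : ¬ (j < r ∧ PySem.List.pyGetD col j 0 ≠ 0) := by
      intro h; omega
    cases m with
    | zero => rfl
    | succ m =>
      show scanRunGo col r 0 j = (if j < r ∧ PySem.List.pyGetD col j 0 ≠ 0 then scanRunGo col r m (j + 1) else j)
      rw [if_neg hc]
      rfl
  | succ n ih =>
    intro m j hn hm
    cases m with
    | zero =>
      have hc : ¬ (j < r ∧ PySem.List.pyGetD col j 0 ≠ 0) := by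
        intro h; omega
      show (if j < r ∧ PySem.List.pyGetD col j 0 ≠ 0 then scanRunGo col r n (j + 1) else j) = scanRunGo col r 0 j
      rw [if_neg hc]
      rfl
    | succ m =>
      show (if j < r ∧ PySem.List.pyGetD col j 0 ≠ 0 then scanRunGo col r n (j + 1) else j)
         = (if j < r ∧ PySem.List.pyGetD col j 0 ≠ 0 then scanRunGo col r m (j + 1) else j)
      by_cases hc : j < r ∧ PySem.List.pyGetD col j 0 ≠ 0
      · rw [if_pos hc, if_pos hc]
        exact ih m (j + 1) (by omega) (by omega)
      · rw [if_neg hc, if_neg hc]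

theorem scanRunGo_eq_scanRun (col : List Int) (r : Int) (n : Nat) (j : Int)
    (hn : (r - j).toNat ≤ n) : scanRunGo col r n j = scanRun col r j :=
  scanRunGo_fuel col r n ((r - j).toNat) j hn (le_refl _)

-- the defining one-step equation of the inner while loop
theorem scanRun_eq (col : List Int) (r j : Int) :
    scanRun col r j =
      if j < r ∧ PySem.List.pyGetD col j 0 ≠ 0 then scanRun col r (j + 1) else j := by
  by_cases hc : j < r ∧ PySem.List.pyGetD col j 0 ≠ 0
  · rw [if_pos hc]
    have hk : ∃ k, (r - j).toNat = k + 1 := ⟨(r - j).toNat - 1, by omega⟩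
    obtain ⟨k, hk⟩ := hk
    conv_lhs => unfold scanRun
    rw [hk]
    show (if j < r ∧ PySem.List.pyGetD col j 0 ≠ 0 then scanRunGo col r k (j + 1) else j) = _
    rw [if_pos hc]
    exact scanRunGo_eq_scanRun col r k (j + 1) (by omega)
  · rw [if_neg hc]
    unfold scanRun
    rcases hk : (r - j).toNat with _ | k
    · rfl
    · show (if j < r ∧ PySem.List.pyGetD col j 0 ≠ 0 then scanRunGo col r k (j + 1) else j) = _
      rw [if_neg hc]

theorem scanRun_ge (col : List Int) (r : Int) :
    ∀ (n : Nat) (j : Int), j ≤ scanRunGo col r n j := by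
  intro n
  induction n with
  | zero => intro j; exact le_refl j
  | succ n ih =>
    intro j
    show j ≤ (if j < r ∧ PySem.List.pyGetD col j 0 ≠ 0 then scanRunGo col r n (j + 1) else j)
    split
    · have := ih (j + 1); omega
    · exact le_refl j

theorem scanRun_ge' (col : List Int) (r j : Int) : j ≤ scanRun col r j :=
  scanRun_ge col r _ j

theorem scanRun_stop (col : List Int) (r j : Int) :
    ¬ (scanRun col r j < r ∧ PySem.List.pyGetD col (scanRun col r j) 0 ≠ 0) := by
  rw [scanRun_eq]
  by_cases hc : j < r ∧ PySem.List.pyGetD col j 0 ≠ 0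
  · rw [if_pos hc]
    exact scanRun_stop col r (j + 1)
  · rw [if_neg hc]
    exact hc
termination_by (r - j).toNat
decreasing_by omega

-- enough fuel: altLoopGo is fuel-independent once the fuel covers the remaining distance
theorem altLoopGo_fuel (col : List Int) (r idx : Int) :
    ∀ (n m : Nat) (i : Int) segs, (r - i).toNat ≤ n → (r - i).toNat ≤ m →
      altLoopGo col r idx n i segs = altLoopGo col r idx m i segs := by
  intro n
  induction n with
  | zero =>
    intro m i segs hn hm
    have hir : ¬ i < r := by omega
    cases m with
    | zero => rfl
    | succ m =>
      show altLoopGo col r idx 0 i segs = (if i < r then _ else segs)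
      rw [if_neg hir]
      rfl
  | succ n ih =>
    intro m i segs hn hm
    cases m with
    | zero =>
      have hir : ¬ i < r := by omega
      show (if i < r then _ else segs) = altLoopGo col r idx 0 i segs
      rw [if_neg hir]
      rfl
    | succ m =>
      by_cases hir : i < r
      · show (if i < r then _ else segs) = (if i < r then _ else segs)
        rw [if_pos hir, if_pos hir]
        by_cases hz : PySem.List.pyGetD col i 0 ≠ 0
        · rw [if_pos hz, if_pos hz]
          have hge : i + 1 ≤ scanRun col r i := by
            have h1 : scanRun col r i = scanRun col r (i + 1) := by
              rw [scanRun_eq]; rw [if_pos ⟨hir, hz⟩]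
            have := scanRun_ge' col r (i + 1); omega
          exact ih m _ _ (by omega) (by omega)
        · rw [if_neg hz, if_neg hz]
          exact ih m _ _ (by omega) (by omega)
      · show (if i < r then _ else segs) = (if i < r then _ else segs)
        rw [if_neg hir, if_neg hir]

theorem altLoopGo_eq_altLoop (col : List Int) (r idx : Int) (n : Nat) (i : Int) segs
    (hn : (r - i).toNat ≤ n) : altLoopGo col r idx n i segs = altLoop col r idx i segs :=
  altLoopGo_fuel col r idx n ((r - i).toNat) i segs hn (le_refl _)

-- the defining one-step equation of the outer while loop
theorem altLoop_eq (col : List Int) (r idx i : Int) (segs : List ((Int × Int) × (Int × Int) × Int)) :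
    altLoop col r idx i segs =
      if i < r then
        if PySem.List.pyGetD col i 0 ≠ 0 then
          altLoop col r idx (scanRun col r i)
            (if 2 ≤ scanRun col r i - i then
              PySem.Set.add segs ((i, idx), (scanRun col r i - 1, idx), scanRun col r i - i)
            else segs)
        else altLoop col r idx (i + 1) segs
      else segs := by
  by_cases hir : i < r
  · rw [if_pos hir]
    have hk : ∃ k, (r - i).toNat = k + 1 := ⟨(r - i).toNat - 1, by omega⟩
    obtain ⟨k, hk⟩ := hk
    conv_lhs => unfold altLoop
    rw [hk]
    by_cases hz : PySem.List.pyGetD col i 0 = 0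
    · show (if i < r then _ else segs) = _
      rw [if_pos hir, if_neg (not_not_intro hz), if_neg (not_not_intro hz)]
      exact altLoopGo_eq_altLoop col r idx k (i + 1) segs (by omega)
    · have hge : i + 1 ≤ scanRun col r i := by
        have h1 : scanRun col r i = scanRun col r (i + 1) := by
          rw [scanRun_eq]; rw [if_pos ⟨hir, hz⟩]
        have := scanRun_ge' col r (i + 1); omega
      show (if i < r then _ else segs) = _
      rw [if_pos hir, if_pos hz, if_pos hz]
      exact altLoopGo_eq_altLoop col r idx k _ _ (by omega)
  · rw [if_neg hir]
    unfold altLoop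
    rcases hk : (r - i).toNat with _ | k
    · rfl
    · show (if i < r then _ else segs) = segs
      rw [if_neg hir]

-- A's loop-tail-plus-final-flush, starting from an arbitrary state
def tailA (col : List Int) (r idx i : Int)
    (st : (List ((Int × Int) × (Int × Int) × Int)) × Int × Int) : List ((Int × Int) × (Int × Int) × Int) :=
  let st' := (PySem.List.pyRange i r 1).foldl (stepA col idx) st
  flushA idx st'.1 st'.2.1 st'.2.2

-- mid-run invariant: A about to process index i, run started at s < i, end = i - 1
theorem tailA_midrun (col : List Int) (r idx : Int) :
    ∀ (n : Nat) (i s : Int) segs, (r - i).toNat ≤ n → 0 ≤ s → s < i →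
      tailA col r idx i (segs, s, i - 1) =
        (if scanRun col r i < r then
          tailA col r idx (scanRun col r i + 1)
            ((if s ≠ scanRun col r i - 1 then
                PySem.Set.add segs ((s, idx), (scanRun col r i - 1, idx), (scanRun col r i - 1) - s + 1)
              else segs), -1, -1)
        else
          (if s ≠ scanRun col r i - 1 then
            PySem.Set.add segs ((s, idx), (scanRun col r i - 1, idx), (scanRun col r i - 1) - s + 1)
          else segs)) := by
  intro n
  induction n with
  | zero =>
    intro i s segs hn hs hsi
    have hir : ¬ i < r := by omega
    have hj : scanRun col r i = i := by rw [scanRun_eq]; simp; omega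
    rw [hj, if_neg hir]
    unfold tailA
    rw [PySem.List.pyRange_one_eq_nil (by omega)]
    simp only [List.foldl_nil]
    unfold flushA
    by_cases hse : s = i - 1
    · simp [hse]
    · have hcnd : s ≠ -1 ∧ i - 1 ≠ -1 ∧ s ≠ i - 1 := by omega
      simp [hcnd]
  | succ n ih =>
    intro i s segs hn hs hsi
    by_cases hir : i < r
    · by_cases hz : PySem.List.pyGetD col i 0 = 0
      · -- zero cell: A flushes; scanRun stops at i
        have hj : scanRun col r i = i := by rw [scanRun_eq]; simp [hz]
        rw [hj, if_pos hir]
        unfold tailA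
        rw [PySem.List.pyRange_one_cons hir]
        simp only [List.foldl_cons]
        have hstep : stepA col idx (segs, s, i - 1) i = (flushA idx segs s (i - 1), -1, -1) := by
          simp [stepA, hz]
        rw [hstep]
        have hfl : flushA idx segs s (i - 1) =
            (if s ≠ i - 1 then PySem.Set.add segs ((s, idx), (i - 1, idx), (i - 1) - s + 1) else segs) := by
          unfold flushA
          by_cases hse : s = i - 1
          · simp [hse]
          · have hcnd : s ≠ -1 ∧ i - 1 ≠ -1 ∧ s ≠ i - 1 := by omega
            simp [hcnd]
        rw [hfl]
      · -- nonzero cell: run continues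
        have hj : scanRun col r i = scanRun col r (i + 1) := by
          rw [scanRun_eq]; rw [if_pos ⟨hir, hz⟩]
        have hfold : tailA col r idx i (segs, s, i - 1) = tailA col r idx (i + 1) (segs, s, (i + 1) - 1) := by
          unfold tailA
          rw [PySem.List.pyRange_one_cons hir]
          simp only [List.foldl_cons]
          have hstep : stepA col idx (segs, s, i - 1) i = (segs, s, i - 1 + 1) := by
            have hsne : ¬ (s = -1) := by omega
            simp [stepA, hz, hsne]
          rw [hstep]
          norm_num
        rw [hfold, hj]
        exact ih (i + 1) s segs (by omega) hs (by omega)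
    · -- loop over: scanRun stops at i, final flush
      have hj : scanRun col r i = i := by rw [scanRun_eq]; simp; omega
      rw [hj, if_neg hir]
      unfold tailA
      rw [PySem.List.pyRange_one_eq_nil (by omega)]
      simp only [List.foldl_nil]
      unfold flushA
      by_cases hse : s = i - 1
      · simp [hse]
      · have hcnd : s ≠ -1 ∧ i - 1 ≠ -1 ∧ s ≠ i - 1 := by omega
        simp [hcnd]

-- between runs: A's remaining loop from a fresh (-1, -1) state equals B's loop
theorem tailA_fresh (col : List Int) (r idx : Int) :
    ∀ (n : Nat) (i : Int) segs, (r - i).toNat ≤ n → 0 ≤ i →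
      tailA col r idx i (segs, -1, -1) = altLoop col r idx i segs := by
  intro n
  induction n with
  | zero =>
    intro i segs hn hi
    have hir : ¬ i < r := by omega
    unfold tailA
    rw [PySem.List.pyRange_one_eq_nil (by omega)]
    simp only [List.foldl_nil]
    rw [altLoop_eq, if_neg hir]
    simp [flushA]
  | succ n ih =>
    intro i segs hn hi
    by_cases hir : i < r
    · by_cases hz : PySem.List.pyGetD col i 0 = 0
      · -- zero cell: both skip
        have hfold : tailA col r idx i (segs, -1, -1) = tailA col r idx (i + 1) (segs, -1, -1) := by
          unfold tailA
          rw [PySem.List.pyRange_one_cons hir]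
          simp only [List.foldl_cons]
          have hstep : stepA col idx (segs, -1, -1) i = (segs, -1, -1) := by
            simp [stepA, hz, flushA]
          rw [hstep]
        have halt : altLoop col r idx i segs = altLoop col r idx (i + 1) segs := by
          rw [altLoop_eq, if_pos hir, if_neg (not_not_intro hz)]
        rw [hfold, halt]
        exact ih (i + 1) segs (by omega) (by omega)
      · -- nonzero cell: a run starts at i
        have hj : scanRun col r i = scanRun col r (i + 1) := by
          rw [scanRun_eq]; rw [if_pos ⟨hir, hz⟩]
        have hjge : i + 1 ≤ scanRun col r i := by
          have := scanRun_ge' col r (i + 1); omega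
        have hstop : ¬ (scanRun col r i < r ∧ PySem.List.pyGetD col (scanRun col r i) 0 ≠ 0) := by
          rw [hj]; exact scanRun_stop col r (i + 1)
        have hfold : tailA col r idx i (segs, -1, -1) = tailA col r idx (i + 1) (segs, i, (i + 1) - 1) := by
          unfold tailA
          rw [PySem.List.pyRange_one_cons hir]
          simp only [List.foldl_cons]
          have hstep : stepA col idx (segs, -1, -1) i = (segs, i, i) := by
            simp [stepA, hz]
          rw [hstep]
          norm_num
        have hsegs : (if i ≠ scanRun col r i - 1 then
              PySem.Set.add segs ((i, idx), (scanRun col r i - 1, idx), (scanRun col r i - 1) - i + 1)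
            else segs)
            = (if 2 ≤ scanRun col r i - i then
              PySem.Set.add segs ((i, idx), (scanRun col r i - 1, idx), scanRun col r i - i)
            else segs) := by
          by_cases h2 : 2 ≤ scanRun col r i - i
          · rw [if_pos (by omega : i ≠ scanRun col r i - 1), if_pos h2]
            have hlen : (scanRun col r i - 1) - i + 1 = scanRun col r i - i := by omega
            rw [hlen]
          · rw [if_neg (by omega : ¬ i ≠ scanRun col r i - 1), if_neg h2]
        have halt : altLoop col r idx i segs = altLoop col r idx (scanRun col r i)
            (if 2 ≤ scanRun col r i - i then
              PySem.Set.add segs ((i, idx), (scanRun col r i - 1, idx), scanRun col r i - i)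
            else segs) := by
          rw [altLoop_eq, if_pos hir, if_pos hz]
        rw [hfold, tailA_midrun col r idx (r - (i + 1)).toNat (i + 1) i segs (le_refl _) hi (by omega),
          ← hj, hsegs, halt]
        by_cases hjr : scanRun col r i < r
        · have hjz : PySem.List.pyGetD col (scanRun col r i) 0 = 0 := by
            by_contra hne; exact hstop ⟨hjr, hne⟩
          rw [if_pos hjr]
          have halt2 : altLoop col r idx (scanRun col r i)
              (if 2 ≤ scanRun col r i - i then
                PySem.Set.add segs ((i, idx), (scanRun col r i - 1, idx), scanRun col r i - i)
              else segs) = altLoop col r idx (scanRun col r i + 1)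
              (if 2 ≤ scanRun col r i - i then
                PySem.Set.add segs ((i, idx), (scanRun col r i - 1, idx), scanRun col r i - i)
              else segs) := by
            rw [altLoop_eq, if_pos hjr, if_neg (not_not_intro hjz)]
          rw [halt2]
          exact ih (scanRun col r i + 1) _ (by omega) (by omega)
        · rw [if_neg hjr, altLoop_eq, if_neg hjr]
    · -- done: empty range, flush of (-1, -1) is a no-op
      unfold tailA
      rw [PySem.List.pyRange_one_eq_nil (by omega)]
      simp only [List.foldl_nil]
      rw [altLoop_eq, if_neg hir]
      simp [flushA]

-- ===== VERDICT (by name: the statement is the Claim_ definition above) =====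
theorem get_segments_col_spec : Claim_equal_get_segments_col := by
  intro col r idx _ _
  unfold Spec_get_segments_col get_segments_col get_segments_col_alt
  exact tailA_fresh col r idx r.toNat 0 [] (by omega) le_rfl
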